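-- pv_equiv track=rewrite | github.com/muhammadzaini213/AI-Pemberantas | plot/sa_vrp_garage_as_tpa.py | split_into_trips
-- ===== SOURCE A (Python) =====
-- def split_into_trips(tps_sequence, demand_per_tps, capacity, garage_node):
--     route = [garage_node]
--     curr_load = 0
--     for t in tps_sequence:
--         demand = demand_per_tps.get(t, 1)
--         if curr_load + demand > capacity:
--             route.append(garage_node)
--             route.append(garage_node)  # start new trip
--             curr_load = 0
--         route.append(t)
--         curr_load += demand
--     if route[-1] != garage_node:
--         route.append(garage_node)
--     return route
-- ===== SOURCE B (Python) =====
-- def split_into_trips(tps_sequence, demand_per_tps, capacity, garage_node):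
--     # Phase 1: greedily group the sequence into capacity-limited trips.
--     trips = []
--     cur = []
--     load = 0
--     for t in tps_sequence:
--         d = demand_per_tps.get(t, 1)
--         if load + d > capacity:
--             trips.append(cur)
--             cur = []
--             load = 0
--         cur.append(t)
--         load += d
--     trips.append(cur)
--     # Phase 2: emit the route, separating consecutive trips by a double garage stop.
--     route = [garage_node]
--     first = True
--     for trip in trips:
--         if not first:
--             route += [garage_node, garage_node]
--         route += trip
--         first = False
--     if route[-1] != garage_node:
--         route.append(garage_node)
--     return route
-- ===== Notes on version B (the rewrite author's own statement) =====
-- stated objective: alternative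
-- what changed: Replaces A's single fused loop that interleaves garage stops into the route as it scans with a two-phase decomposition: first greedily group the sequence into capacity-limited trips (list of sublists), then emit the route by joining the trips with double garage stops.
import Mathlib
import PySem

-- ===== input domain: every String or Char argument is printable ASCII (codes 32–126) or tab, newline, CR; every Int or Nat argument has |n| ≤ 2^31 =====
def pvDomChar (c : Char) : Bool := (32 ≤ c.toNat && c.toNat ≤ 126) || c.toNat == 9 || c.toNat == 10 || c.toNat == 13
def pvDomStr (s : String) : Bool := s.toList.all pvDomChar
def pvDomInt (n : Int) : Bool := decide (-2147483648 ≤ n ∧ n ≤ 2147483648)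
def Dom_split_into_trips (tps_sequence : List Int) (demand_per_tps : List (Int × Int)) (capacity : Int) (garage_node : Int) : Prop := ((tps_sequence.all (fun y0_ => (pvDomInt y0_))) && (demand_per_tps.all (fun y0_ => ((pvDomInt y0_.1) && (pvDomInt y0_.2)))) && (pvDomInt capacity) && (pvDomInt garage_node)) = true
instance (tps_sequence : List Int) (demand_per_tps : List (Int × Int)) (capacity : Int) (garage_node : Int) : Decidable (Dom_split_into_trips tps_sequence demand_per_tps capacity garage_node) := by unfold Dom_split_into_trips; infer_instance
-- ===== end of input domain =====

-- ===== PORT A =====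
-- B re-decomposes A's single fused loop into group-into-trips + emit-with-separators phases (objective: alternative decomposition, same cost).
def stepA (demand_per_tps : List (Int × Int)) (capacity garage_node : Int)
    (s : List Int × Int) (t : Int) : List Int × Int :=
  let demand := PySem.Dict.getD (PySem.Dict.ofList demand_per_tps) t 1
  let s := if s.2 + demand > capacity then (s.1 ++ [garage_node, garage_node], (0 : Int)) else s
  (s.1 ++ [t], s.2 + demand)

-- shared final lines of both Pythons: `if route[-1] != garage_node: route.append(garage_node)`
-- (the `none` branch is a totality guard; route is always nonempty)
def finishRoute (garage_node : Int) (route : List Int) : List Int :=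
  match PySem.List.pyGet? route (-1) with
  | some x => if x ≠ garage_node then route ++ [garage_node] else route
  | none => route

def split_into_trips (tps_sequence : List Int) (demand_per_tps : List (Int × Int)) (capacity : Int) (garage_node : Int) : List Int :=
  let r := List.foldl (stepA demand_per_tps capacity garage_node) ([garage_node], 0) tps_sequence
  finishRoute garage_node r.1

-- ===== PORT B =====
def stepB (demand_per_tps : List (Int × Int)) (capacity : Int)
    (s : List (List Int) × List Int × Int) (t : Int) : List (List Int) × List Int × Int :=
  let d := PySem.Dict.getD (PySem.Dict.ofList demand_per_tps) t 1
  let s := if s.2.2 + d > capacity then (s.1 ++ [s.2.1], ([] : List Int), (0 : Int)) else s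
  (s.1, s.2.1 ++ [t], s.2.2 + d)

def emitStep (garage_node : Int) (s : List Int × Bool) (trip : List Int) : List Int × Bool :=
  (if s.2 then s.1 ++ trip else s.1 ++ [garage_node, garage_node] ++ trip, false)

def split_into_trips_alt (tps_sequence : List Int) (demand_per_tps : List (Int × Int)) (capacity : Int) (garage_node : Int) : List Int :=
  let gst := List.foldl (stepB demand_per_tps capacity) (([] : List (List Int)), ([] : List Int), (0 : Int)) tps_sequence
  let trips := gst.1 ++ [gst.2.1]
  let er := List.foldl (emitStep garage_node) (([garage_node], true)) trips
  finishRoute garage_node er.1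

-- ===== PRECONDITION & SPEC =====
def Spec_split_into_trips (tps_sequence : List Int) (demand_per_tps : List (Int × Int)) (capacity : Int) (garage_node : Int) (out : List Int) : Prop := out = split_into_trips_alt tps_sequence demand_per_tps capacity garage_node
instance (tps_sequence : List Int) (demand_per_tps : List (Int × Int)) (capacity : Int) (garage_node : Int) (out : List Int) : Decidable (Spec_split_into_trips tps_sequence demand_per_tps capacity garage_node out) := by unfold Spec_split_into_trips; infer_instance

-- ===== CLAIM (what is proved, stated in full; the proofs are below) =====
def Claim_equal_split_into_trips : Prop := ∀ (tps_sequence : List Int) (demand_per_tps : List (Int × Int)) (capacity : Int) (garage_node : Int), Dom_split_into_trips tps_sequence demand_per_tps capacity garage_node → Spec_split_into_trips tps_sequence demand_per_tps capacity garage_node (split_into_trips tps_sequence demand_per_tps capacity garage_node)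

-- ===== LEMMAS AND PROOFS =====

-- the route body emitted for a nonempty list of trips: first trip plain, each later trip preceded by a double garage stop
def interG (garage_node : Int) : List (List Int) → List Int
  | [] => []
  | t :: ts => t ++ ts.flatMap (fun tr => garage_node :: garage_node :: tr)

theorem interG_snoc_item (g : Int) (acc : List (List Int)) (cur : List Int) (t : Int) :
    interG g (acc ++ [cur ++ [t]]) = interG g (acc ++ [cur]) ++ [t] := by
  cases acc <;> simp [interG]

theorem cons_exists (acc : List (List Int)) (cur : List Int) :
    ∃ t0 ts, acc ++ [cur] = t0 :: ts := by
  cases acc <;> exact ⟨_, _, rfl⟩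

theorem loop_rel (dem : List (Int × Int)) (cap g : Int) :
    ∀ (seq : List Int) (acc : List (List Int)) (cur : List Int) (load : Int),
    List.foldl (stepA dem cap g) (g :: interG g (acc ++ [cur]), load) seq
      = (fun s => (g :: interG g (s.1 ++ [s.2.1]), s.2.2))
          (List.foldl (stepB dem cap) (acc, cur, load) seq) := by
  intro seq
  induction seq with
  | nil => intro acc cur load; rfl
  | cons t rest ih =>
    intro acc cur load
    by_cases h : load + PySem.Dict.getD (PySem.Dict.ofList dem) t 1 > cap
    · have e1 : stepA dem cap g (g :: interG g (acc ++ [cur]), load) t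
          = (g :: interG g ((acc ++ [cur]) ++ [[t]]), 0 + PySem.Dict.getD (PySem.Dict.ofList dem) t 1) := by
        obtain ⟨t0, ts, he⟩ := cons_exists acc cur
        rw [he]
        simp [stepA, if_pos h, interG]
      have e2 : stepB dem cap (acc, cur, load) t
          = (acc ++ [cur], [t], 0 + PySem.Dict.getD (PySem.Dict.ofList dem) t 1) := by
        simp [stepB, if_pos h]
      simp only [List.foldl_cons, e1, e2]
      simpa [List.append_assoc] using
        ih (acc ++ [cur]) [t] (0 + PySem.Dict.getD (PySem.Dict.ofList dem) t 1)
    · have e1 : stepA dem cap g (g :: interG g (acc ++ [cur]), load) t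
          = (g :: interG g (acc ++ [cur ++ [t]]), load + PySem.Dict.getD (PySem.Dict.ofList dem) t 1) := by
        simp [stepA, if_neg h, interG_snoc_item]
      have e2 : stepB dem cap (acc, cur, load) t
          = (acc, cur ++ [t], load + PySem.Dict.getD (PySem.Dict.ofList dem) t 1) := by
        simp [stepB, if_neg h]
      simp only [List.foldl_cons, e1, e2]
      exact ih acc (cur ++ [t]) (load + PySem.Dict.getD (PySem.Dict.ofList dem) t 1)

theorem emit_false (g : Int) :
    ∀ (trips : List (List Int)) (r : List Int),
    List.foldl (emitStep g) (r, false) trips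
      = (r ++ trips.flatMap (fun tr => g :: g :: tr), false) := by
  intro trips
  induction trips with
  | nil => intro r; simp
  | cons t ts ih => intro r; simp [emitStep, ih]

theorem emit_true (g : Int) (t0 : List Int) (ts : List (List Int)) :
    (List.foldl (emitStep g) (([g], true)) (t0 :: ts)).1 = g :: interG g (t0 :: ts) := by
  simp [emitStep, emit_false, interG]

-- ===== VERDICT (by name: the statement is the Claim_ definition above) =====
theorem split_into_trips_spec : Claim_equal_split_into_trips := by
  intro seq dem cap g _dom
  unfold Spec_split_into_trips split_into_trips split_into_trips_alt
  have base : ([g] : List Int) = g :: interG g (([] : List (List Int)) ++ [([] : List Int)]) := by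
    simp [interG]
  have h := loop_rel dem cap g seq [] [] 0
  rw [← base] at h
  rw [h]
  obtain ⟨t0, ts, he⟩ :=
    cons_exists (List.foldl (stepB dem cap) ([], [], 0) seq).1
      (List.foldl (stepB dem cap) ([], [], 0) seq).2.1
  simp only [he, emit_true]
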